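-- pv_equiv track=rewrite | github.com/ishaanjalan05/cs340proj4 | report.py | build_counter_table
-- ===== SOURCE A (Python) =====
-- from collections import Counter
--
-- def make_table(headers, rows):
--     str_rows = [[str(cell) for cell in row] for row in rows]
--     widths = []
--     for i, header in enumerate(headers):
--         col_values = [header]
--         col_values.extend(row[i] for row in str_rows)
--         widths.append(max(len(v) for v in col_values))
--
--     border = "+-" + "-+-".join("-" * w for w in widths) + "-+"
--     header_line = "| " + " | ".join(headers[i].ljust(widths[i]) for i in range(len(headers))) + " |"
--
--     lines = [border, header_line, border]
--     for row in str_rows: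
--         lines.append("| " + " | ".join(row[i].ljust(widths[i]) for i in range(len(headers))) + " |")
--     lines.append(border)
--     return "\n".join(lines)
--
-- def build_counter_table(scan_data, key_name, title_name):
--     counter = Counter()
--     for result in scan_data.values():
--         value = result.get(key_name)
--         if value is not None:
--             counter[value] += 1
--
--     rows = sorted(counter.items(), key=lambda x: (-x[1], x[0]))
--     table_rows = [[name, count] for name, count in rows]
--     return make_table([title_name, "Count"], table_rows)
-- ===== SOURCE B (Python) =====
-- def make_table(headers, rows):
--     str_rows = [[str(cell) for cell in row] for row in rows]
--     widths = []
--     for i, header in enumerate(headers):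
--         col_values = [header]
--         col_values.extend(row[i] for row in str_rows)
--         widths.append(max(len(v) for v in col_values))
--
--     border = "+-" + "-+-".join("-" * w for w in widths) + "-+"
--     header_line = "| " + " | ".join(headers[i].ljust(widths[i]) for i in range(len(headers))) + " |"
--
--     lines = [border, header_line, border]
--     for row in str_rows:
--         lines.append("| " + " | ".join(row[i].ljust(widths[i]) for i in range(len(headers))) + " |")
--     lines.append(border)
--     return "\n".join(lines)
--
-- def build_counter_table(scan_data, key_name, title_name):
--     # sort-and-group aggregation instead of hash-based counting
--     vals = sorted(r[key_name] for r in scan_data.values() if key_name in r)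
--     pairs = []
--     i = 0
--     n = len(vals)
--     while i < n:
--         j = i + 1
--         while j < n and vals[j] == vals[i]:
--             j += 1
--         pairs.append((vals[i], j - i))
--         i = j
--     pairs.sort(key=lambda x: (-x[1], x[0]))
--     return make_table([title_name, "Count"], pairs)
-- ===== Notes on version B (the rewrite author's own statement) =====
-- stated objective: alternative
-- what changed: Replaced the hash-based Counter aggregation with a sort-then-group pass: all non-missing values are sorted and run-length encoded into (value, count) pairs; the final tie-break sort and the table rendering are unchanged.
import Mathlib
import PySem

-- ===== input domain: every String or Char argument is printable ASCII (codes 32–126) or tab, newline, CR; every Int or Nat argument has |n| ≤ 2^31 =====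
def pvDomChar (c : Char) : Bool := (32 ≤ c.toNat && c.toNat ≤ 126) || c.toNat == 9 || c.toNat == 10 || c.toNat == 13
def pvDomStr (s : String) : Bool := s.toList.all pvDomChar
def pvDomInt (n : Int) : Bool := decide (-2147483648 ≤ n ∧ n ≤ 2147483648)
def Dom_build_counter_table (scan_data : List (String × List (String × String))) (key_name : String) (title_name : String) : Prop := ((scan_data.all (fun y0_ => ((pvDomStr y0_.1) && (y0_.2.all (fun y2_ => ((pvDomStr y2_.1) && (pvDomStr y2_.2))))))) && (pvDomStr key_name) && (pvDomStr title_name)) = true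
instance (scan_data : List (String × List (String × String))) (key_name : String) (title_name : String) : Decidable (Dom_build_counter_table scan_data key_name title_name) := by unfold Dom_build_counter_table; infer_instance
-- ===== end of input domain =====

-- B replaces the hash-based Counter aggregation by a sort-then-group run-length pass over the
-- extracted values; the final (-count, name) sort and the table rendering are unchanged.

-- ===== PORT A =====
-- s.ljust(w): pad with spaces on the right up to width w (pyRepeat of a nonpositive count is []) — exact.
def pvLjust (s : String) (w : Int) : String :=
  s ++ String.ofList (PySem.List.pyRepeat [' '] (w - PySem.Str.len s))

-- make_table, typed at the two-column [str, int] rows both callers build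
-- (str(cell) is the identity on the first cell and PySem.Int.toStr on the second;
-- 'for i, header in enumerate(headers)' is ported as an index loop with header = headers[i]).
def pvMakeTable (headers : List String) (rows : List (String × Int)) : String :=
  let str_rows : List (List String) := rows.map (fun row => [row.1, PySem.Int.toStr row.2])
  let widths : List Int :=
    (PySem.List.pyRange 0 (headers.length : Int) 1).foldl (fun ws i =>
      ws ++ [(str_rows.map (fun row => PySem.Str.len (PySem.List.pyGetD row i ""))).foldl max
               (PySem.Str.len (PySem.List.pyGetD headers i ""))]) []
  let border := "+-" ++ PySem.Str.join "-+-" (widths.map (fun w => String.ofList (PySem.List.pyRepeat ['-'] w))) ++ "-+"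
  let header_line := "| " ++ PySem.Str.join " | " ((PySem.List.pyRange 0 (headers.length : Int) 1).map
      (fun i => pvLjust (PySem.List.pyGetD headers i "") (PySem.List.pyGetD widths i 0))) ++ " |"
  let body_lines := str_rows.map (fun row =>
      "| " ++ PySem.Str.join " | " ((PySem.List.pyRange 0 (headers.length : Int) 1).map
        (fun i => pvLjust (PySem.List.pyGetD row i "") (PySem.List.pyGetD widths i 0))) ++ " |")
  PySem.Str.join "\n" ([border, header_line, border] ++ body_lines ++ [border])

def build_counter_table (scan_data : List (String × List (String × String))) (key_name : String) (title_name : String) : String :=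
  let d := PySem.Dict.ofList scan_data
  let counter := d.values.foldl (fun c result =>
      match (PySem.Dict.ofList result).get? key_name with
      | some v => c.modify v 0 (· + 1)
      | none => c) (PySem.Dict.empty : PySem.Dict String Int)
  let rows := PySem.List.sorted2 counter.items (fun x => -x.2) (fun x => x.1)
  let table_rows := rows.map (fun p => (p.1, p.2))
  pvMakeTable [title_name, "Count"] table_rows

-- ===== PORT B =====
-- the grouping while-loop of Source B: each step consumes one maximal run of equal values
-- (j - i = 1 + length of the run of values equal to vals[i] after position i).
def pvRunLength (vals : List String) : List (String × Int) :=
  match vals with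
  | [] => []
  | v :: rest =>
    (v, 1 + ((rest.takeWhile (fun w => w == v)).length : Int)) ::
      pvRunLength (rest.dropWhile (fun w => w == v))
termination_by vals.length
decreasing_by
  have h := (List.dropWhile_sublist (l := rest) (fun w => w == v)).length_le
  simp
  omega

def build_counter_table_alt (scan_data : List (String × List (String × String))) (key_name : String) (title_name : String) : String :=
  let d := PySem.Dict.ofList scan_data
  -- 'r[key_name] for r in … if key_name in r': the getD default is unreachable under the filter
  let vals := PySem.List.sorted
    ((d.values.filter (fun r => (PySem.Dict.ofList r).contains key_name)).map
      (fun r => (PySem.Dict.ofList r).getD key_name "")) (fun v => v)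
  let pairs := pvRunLength vals
  let rows := PySem.List.sorted2 pairs (fun x => -x.2) (fun x => x.1)
  pvMakeTable [title_name, "Count"] rows

-- ===== PRECONDITION & SPEC =====
def Spec_build_counter_table (scan_data : List (String × List (String × String))) (key_name : String) (title_name : String) (out : String) : Prop := out = build_counter_table_alt scan_data key_name title_name
instance (scan_data : List (String × List (String × String))) (key_name : String) (title_name : String) (out : String) : Decidable (Spec_build_counter_table scan_data key_name title_name out) := by unfold Spec_build_counter_table; infer_instance

-- ===== CLAIM (what is proved, stated in full; the proofs are below) =====
def Claim_equal_build_counter_table : Prop := ∀ (scan_data : List (String × List (String × String))) (key_name : String) (title_name : String), Dom_build_counter_table scan_data key_name title_name → Spec_build_counter_table scan_data key_name title_name (build_counter_table scan_data key_name title_name)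

-- ===== LEMMAS AND PROOFS =====

-- sorted2 with keys (k1, k2) is sorted with the single lexicographic key toLex (k1 ·, k2 ·)
lemma pv_sorted2_eq_sorted_lex {α : Type} (xs : List α) (k1 : α → Int) (k2 : α → String) :
    PySem.List.sorted2 xs k1 k2 = PySem.List.sorted xs (fun x => toLex (k1 x, k2 x)) := by
  rw [PySem.List.sorted_eq_foldl_insertBy]
  simp only [PySem.List.sorted2, Bool.false_eq_true, if_false]
  congr 1
  funext acc x
  congr 1
  funext a b
  rw [Bool.eq_iff_iff]
  simp only [Bool.or_eq_true, Bool.and_eq_true, Bool.not_eq_true', decide_eq_true_eq,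
    decide_eq_false_iff_not, Prod.Lex.lt_iff, ofLex_toLex]
  rcases lt_trichotomy (k1 a) (k1 b) with h | h | h
  · simp [h]
  · simp [h]
  · simp only [not_lt_of_gt h, ne_of_gt h, false_and, or_false, false_or, iff_false, not_lt]
    rintro ⟨hle, -⟩
    exact absurd hle (not_le.mpr h)

-- the sort key (-count, name) is injective on (name, count) pairs
lemma pv_lexkey_inj : Function.Injective (fun (x : String × Int) => toLex (-x.2, x.1)) := by
  rintro ⟨a1, a2⟩ ⟨b1, b2⟩ h
  have h' := congrArg ofLex h
  simp only [ofLex_toLex, Prod.mk.injEq] at h'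
  obtain ⟨h2, h1⟩ := h'
  exact Prod.ext h1 (by omega)

-- B's extraction ('if key_name in r' then r[key_name]) is the filterMap of get?
lemma pv_extract_eq (l : List (List (String × String))) (key : String) :
    (l.filter (fun r => (PySem.Dict.ofList r).contains key)).map
        (fun r => (PySem.Dict.ofList r).getD key "")
      = l.filterMap (fun r => (PySem.Dict.ofList r).get? key) := by
  simp only [PySem.Dict.contains_eq_isSome_get?, PySem.Dict.getD]
  induction l with
  | nil => rfl
  | cons r t ih =>
    simp only [List.filter_cons, List.filterMap_cons]
    cases h : (PySem.Dict.ofList r).get? key <;> simp [h, ih]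

-- A's loop ('value = result.get(key); if value is not None: counter[value] += 1')
-- is the Counter loop over the filterMapped values
lemma pv_fold_counter (l : List (List (String × String))) (key : String) (c : PySem.Dict String Int) :
    l.foldl (fun c result =>
        match (PySem.Dict.ofList result).get? key with
        | some v => c.modify v 0 (· + 1)
        | none => c) c
      = (l.filterMap (fun r => (PySem.Dict.ofList r).get? key)).foldl
          (fun c v => c.modify v 0 (· + 1)) c := by
  induction l generalizing c with
  | nil => rfl
  | cons r t ih =>
    cases h : (PySem.Dict.ofList r).get? key <;> simp [h, ih]

-- in a ≤-sorted list every copy of its head v is consumed by takeWhile (== v)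
lemma pv_not_mem_dropWhile (v : String) (rest : List String)
    (hall : ∀ x ∈ rest, v ≤ x) (hp : rest.Pairwise (· ≤ ·)) :
    v ∉ rest.dropWhile (fun w => w == v) := by
  induction rest with
  | nil => simp
  | cons w t ih =>
    rw [List.dropWhile_cons]
    by_cases hw : (w == v) = true
    · simp only [hw, if_true]
      exact ih (fun x hx => hall x (List.mem_cons_of_mem _ hx)) (List.pairwise_cons.mp hp).2
    · simp only [hw, Bool.false_eq_true, if_false]
      have hvw : v < w := lt_of_le_of_ne (hall w (List.mem_cons_self ..)) (by
        intro h; exact hw (by simp [h.symm]))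
      intro hmem
      rcases List.mem_cons.mp hmem with h | h
      · exact absurd h.symm (ne_of_gt hvw)
      · exact absurd rfl (ne_of_gt (lt_of_lt_of_le hvw ((List.pairwise_cons.mp hp).1 v h)))

lemma pv_runLength_fst_mem (l : List String) : ∀ p ∈ pvRunLength l, p.1 ∈ l := by
  induction l using pvRunLength.induct with
  | case1 => simp [pvRunLength]
  | case2 v rest ih =>
    intro p hp
    rw [pvRunLength] at hp
    rcases List.mem_cons.mp hp with h | h
    · simp [h]
    · exact List.mem_cons_of_mem _ ((List.dropWhile_sublist _).mem (ih p h))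

lemma pv_take_count_zero (v u : String) (rest : List String) (hvu : v ≠ u) :
    (rest.takeWhile (fun w => w == u)).count v = 0 := by
  apply List.count_eq_zero.mpr
  intro hmem
  exact hvu (by simpa using List.mem_takeWhile_imp hmem)

lemma pv_count_head (v : String) (rest : List String)
    (hall : ∀ x ∈ rest, v ≤ x) (hp : rest.Pairwise (· ≤ ·)) :
    rest.count v = (rest.takeWhile (fun w => w == v)).length ∧
      (rest.dropWhile (fun w => w == v)).count v = 0 := by
  have hdrop : (rest.dropWhile (fun w => w == v)).count v = 0 :=
    List.count_eq_zero.mpr (pv_not_mem_dropWhile v rest hall hp)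
  refine ⟨?_, hdrop⟩
  conv_lhs => rw [← List.takeWhile_append_dropWhile (p := fun w => w == v) (l := rest)]
  rw [List.count_append, hdrop, Nat.add_zero]
  apply List.count_eq_length.mpr
  intro b hb
  exact (beq_iff_eq.mp (List.mem_takeWhile_imp (p := fun w => w == v) hb)).symm

lemma pv_count_tail (v v0 : String) (rest : List String) (hv : v ≠ v0) :
    (v0 :: rest).count v = (rest.dropWhile (fun w => w == v0)).count v := by
  rw [List.count_cons_of_ne (Ne.symm hv)]
  conv_lhs => rw [← List.takeWhile_append_dropWhile (p := fun w => w == v0) (l := rest)]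
  rw [List.count_append, pv_take_count_zero v v0 rest hv, Nat.zero_add]

-- the run-length pairs of a ≤-sorted list are exactly the (value, multiplicity) pairs
lemma pv_runLength_mem (l : List String) (hp : l.Pairwise (· ≤ ·)) (v : String) (c : Int) :
    (v, c) ∈ pvRunLength l ↔ v ∈ l ∧ c = (l.count v : Int) := by
  induction l using pvRunLength.induct with
  | case1 => simp [pvRunLength]
  | case2 v0 rest ih =>
    have hall : ∀ x ∈ rest, v0 ≤ x := fun x hx => (List.pairwise_cons.mp hp).1 x hx
    have hpr : rest.Pairwise (· ≤ ·) := (List.pairwise_cons.mp hp).2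
    have hcnt := pv_count_head v0 rest hall hpr
    have hpd : (rest.dropWhile (fun w => w == v0)).Pairwise (· ≤ ·) :=
      hpr.sublist (List.dropWhile_sublist _)
    rw [pvRunLength, List.mem_cons, ih hpd]
    constructor
    · rintro (h | ⟨hmem, hc⟩)
      · obtain ⟨hv, hc⟩ := Prod.mk.inj h
        subst hv
        refine ⟨List.mem_cons_self .., ?_⟩
        rw [List.count_cons_self, hcnt.1, hc]
        push_cast
        ring
      · have hvrest : v ∈ rest := (List.dropWhile_sublist _).mem hmem
        have hvne : v ≠ v0 := by
          rintro rfl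
          exact pv_not_mem_dropWhile v rest hall hpr hmem
        exact ⟨List.mem_cons_of_mem _ hvrest, by rw [hc, pv_count_tail v v0 rest hvne]⟩
    · rintro ⟨hmem, hc⟩
      by_cases hv : v = v0
      · subst hv
        left
        rw [hc, List.count_cons_self, hcnt.1]
        push_cast
        ring_nf
      · right
        have hvrest : v ∈ rest := by
          rcases List.mem_cons.mp hmem with h | h
          · exact absurd h hv
          · exact h
        have hvdrop : v ∈ rest.dropWhile (fun w => w == v0) := by
          have htk : v ∉ rest.takeWhile (fun w => w == v0) := by
            intro hmem'
            exact hv (by simpa using List.mem_takeWhile_imp hmem')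
          have hsplit := List.takeWhile_append_dropWhile (p := fun w => w == v0) (l := rest)
          rw [← hsplit] at hvrest
          rcases List.mem_append.mp hvrest with h | h
          · exact absurd h htk
          · exact h
        exact ⟨hvdrop, by rw [hc, pv_count_tail v v0 rest hv]⟩

lemma pv_runLength_nodup (l : List String) (hp : l.Pairwise (· ≤ ·)) :
    (pvRunLength l).Nodup := by
  induction l using pvRunLength.induct with
  | case1 => simp [pvRunLength]
  | case2 v rest ih =>
    have hall : ∀ x ∈ rest, v ≤ x := fun x hx => (List.pairwise_cons.mp hp).1 x hx
    have hpr : rest.Pairwise (· ≤ ·) := (List.pairwise_cons.mp hp).2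
    have hpd : (rest.dropWhile (fun w => w == v)).Pairwise (· ≤ ·) :=
      hpr.sublist (List.dropWhile_sublist _)
    rw [pvRunLength]
    refine List.nodup_cons.mpr ⟨?_, ih hpd⟩
    intro hmem
    exact pv_not_mem_dropWhile v rest hall hpr (pv_runLength_fst_mem _ _ hmem)

-- Counter(vs).items membership, after PySem.Dict.items_counter
lemma pv_items_side_mem (vs : List String) (v : String) (c : Int) :
    (v, c) ∈ (PySem.Set.ofList vs).map (fun k => (k, (vs.count k : Int)))
      ↔ v ∈ vs ∧ c = (vs.count v : Int) := by
  rw [List.mem_map]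
  constructor
  · rintro ⟨a, ha, heq⟩
    obtain ⟨h1, h2⟩ := Prod.mk.inj heq
    subst h1
    exact ⟨(PySem.Set.mem_ofList vs a).mp ha, h2.symm⟩
  · rintro ⟨hmem, hc⟩
    exact ⟨v, (PySem.Set.mem_ofList vs v).mpr hmem, by rw [hc]⟩

lemma pv_items_side_nodup (vs : List String) :
    ((PySem.Set.ofList vs).map (fun k => (k, (vs.count k : Int)))).Nodup :=
  List.Nodup.map (fun _ _ h => (Prod.mk.inj h).1) (PySem.Set.nodup_ofList vs)

-- the two pre-sort pair lists are permutations of each other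
lemma pv_perm (vs : List String) :
    (pvRunLength (PySem.List.sorted vs (fun v => v))).Perm
      ((PySem.Set.ofList vs).map (fun k => (k, (vs.count k : Int)))) := by
  have hp : (PySem.List.sorted vs (fun v => v)).Pairwise (· ≤ ·) := by
    simpa using PySem.List.sorted_pairwise vs (fun v => v)
  rw [List.perm_ext_iff_of_nodup (pv_runLength_nodup _ hp) (pv_items_side_nodup vs)]
  rintro ⟨v, c⟩
  rw [pv_runLength_mem _ hp, pv_items_side_mem]
  have hq := PySem.List.sorted_perm vs (fun v => v) false
  rw [hq.mem_iff, hq.count_eq]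

-- ===== VERDICT (by name: the statement is the Claim_ definition above) =====
theorem build_counter_table_spec : Claim_equal_build_counter_table := by
  intro scan_data key_name title_name _
  show build_counter_table scan_data key_name title_name
      = build_counter_table_alt scan_data key_name title_name
  unfold build_counter_table build_counter_table_alt
  simp only [pv_fold_counter, ← PySem.Dict.counter_eq_foldl, PySem.Dict.items_counter,
    pv_extract_eq, pv_sorted2_eq_sorted_lex]
  congr 1
  rw [show (fun p : String × Int => (p.1, p.2)) = id from funext (fun p => rfl), List.map_id]
  exact (PySem.List.sorted_eq_sorted_of_perm _ _ _ pv_lexkey_inj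
    (pv_perm _)).symm
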